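-- pv_equiv track=rewrite | github.com/jlrussin/interpret-math-transformer | utils.py | determine_x_match
-- ===== SOURCE A (Python) =====
-- def determine_x_match(custom_name, diff_name, filt_name):
--   diffs = ['diff_x{}'.format(i) for i in range(1,7)]
--   filts = ['x{}'.format(i) for i in range(1,7)]
--   if diff_name in diffs and filt_name in filts:
--     include = True
--     matched = diffs.index(diff_name) == filts.index(filt_name)
--   else:
--     include = False
--     matched = None
--   return include, matched
-- ===== SOURCE B (Python) =====
-- def _ds(diff_name):
--     return diff_name[6:] if diff_name.startswith('diff_x') else ''
--
-- def _fs(filt_name):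
--     return filt_name[1:] if filt_name.startswith('x') else ''
--
-- def determine_x_match(custom_name, diff_name, filt_name):
--     ds = _ds(diff_name)
--     fs = _fs(filt_name)
--     if len(ds) == 1 and ds in '123456' and len(fs) == 1 and fs in '123456':
--         return True, ds == fs
--     return False, None
-- ===== Notes on version B (the rewrite author's own statement) =====
-- stated objective: simpler
-- what changed: B drops A's two constructed name lists and their membership/index scans, instead parsing each name directly: fixed prefix ('diff_x' / 'x') plus a single-character suffix in '123456', and compares the suffixes.
import Mathlib
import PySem

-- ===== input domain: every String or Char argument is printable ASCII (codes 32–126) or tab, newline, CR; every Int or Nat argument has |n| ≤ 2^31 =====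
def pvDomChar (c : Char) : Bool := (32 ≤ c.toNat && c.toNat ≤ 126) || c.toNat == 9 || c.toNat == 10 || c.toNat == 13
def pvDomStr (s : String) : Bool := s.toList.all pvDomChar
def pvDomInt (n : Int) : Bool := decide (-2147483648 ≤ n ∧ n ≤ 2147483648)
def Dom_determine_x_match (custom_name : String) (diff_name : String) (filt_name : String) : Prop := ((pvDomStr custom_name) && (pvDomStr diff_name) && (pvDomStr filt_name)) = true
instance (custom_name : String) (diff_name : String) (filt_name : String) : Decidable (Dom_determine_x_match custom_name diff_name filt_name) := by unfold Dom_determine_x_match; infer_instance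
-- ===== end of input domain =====

-- B replaces A's two constructed name lists and double list search by direct parsing of the
-- two names (prefix check + single-digit suffix in '1'..'6'); objective: simpler.

-- ===== PORT A =====
-- diffs = ['diff_x{}'.format(i) for i in range(1,7)]
def pvDiffs : List String := (PySem.List.pyRange 1 7 1).map (fun i => "diff_x" ++ PySem.Int.toStr i)
-- filts = ['x{}'.format(i) for i in range(1,7)]
def pvFilts : List String := (PySem.List.pyRange 1 7 1).map (fun i => "x" ++ PySem.Int.toStr i)

def determine_x_match (custom_name : String) (diff_name : String) (filt_name : String) : Bool × Option Bool :=
  if pvDiffs.contains diff_name && pvFilts.contains filt_name then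
    (true, some (PySem.List.index? pvDiffs diff_name == PySem.List.index? pvFilts filt_name))
  else
    (false, none)

-- ===== PORT B =====
-- ds = diff_name[6:] if diff_name.startswith('diff_x') else ''
def pvDs (diff_name : String) : String :=
  if PySem.Str.startswith diff_name "diff_x" then PySem.Str.slice diff_name (some 6) none else ""
-- fs = filt_name[1:] if filt_name.startswith('x') else ''
def pvFs (filt_name : String) : String :=
  if PySem.Str.startswith filt_name "x" then PySem.Str.slice filt_name (some 1) none else ""

def determine_x_match_alt (custom_name : String) (diff_name : String) (filt_name : String) : Bool × Option Bool :=
  if PySem.Str.len (pvDs diff_name) == 1 && PySem.Str.isIn (pvDs diff_name) "123456"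
      && PySem.Str.len (pvFs filt_name) == 1 && PySem.Str.isIn (pvFs filt_name) "123456" then
    (true, some (pvDs diff_name == pvFs filt_name))
  else
    (false, none)

-- ===== PRECONDITION & SPEC =====
def Spec_determine_x_match (custom_name : String) (diff_name : String) (filt_name : String) (out : Bool × Option Bool) : Prop := out = determine_x_match_alt custom_name diff_name filt_name
instance (custom_name : String) (diff_name : String) (filt_name : String) (out : Bool × Option Bool) : Decidable (Spec_determine_x_match custom_name diff_name filt_name out) := by unfold Spec_determine_x_match; infer_instance

-- ===== CLAIM (what is proved, stated in full; the proofs are below) =====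
def Claim_equal_determine_x_match : Prop := ∀ (custom_name : String) (diff_name : String) (filt_name : String), Dom_determine_x_match custom_name diff_name filt_name → Spec_determine_x_match custom_name diff_name filt_name (determine_x_match custom_name diff_name filt_name)

-- ===== LEMMAS AND PROOFS =====

theorem pvDiffs_eq : pvDiffs = ["diff_x1","diff_x2","diff_x3","diff_x4","diff_x5","diff_x6"] := by decide

theorem pvFilts_eq : pvFilts = ["x1","x2","x3","x4","x5","x6"] := by decide

theorem singleton_infix_iff_mem (a : Char) (l : List Char) : [a] <:+: l ↔ a ∈ l := by
  constructor
  · intro h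
    exact List.singleton_sublist.mp h.sublist
  · intro h
    obtain ⟨s, t, hst⟩ := List.append_of_mem h
    exact ⟨s, t, by simp [hst]⟩

theorem pvDs_valid (s : String)
    (h1 : PySem.Str.len (pvDs s) = 1)
    (h2 : PySem.Str.isIn (pvDs s) "123456" = true) :
    s ∈ (["diff_x1","diff_x2","diff_x3","diff_x4","diff_x5","diff_x6"] : List String) := by
  by_cases hsw : PySem.Str.startswith s "diff_x" = true
  · have hsw' : PySem.Chars.startswith s.toList "diff_x".toList = true := by
      rw [← PySem.Str.startswith_eq]; exact hsw
    obtain ⟨r, hr⟩ := (PySem.Chars.startswith_iff s.toList "diff_x".toList).mp hsw'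
    have h6' : ((6:Int).toNat) = "diff_x".toList.length := by decide
    have hds : (pvDs s).toList = r := by
      unfold pvDs
      rw [if_pos hsw]
      rw [PySem.Str.toList_slice, PySem.Chars.slice_eq_listSlice,
        PySem.List.slice_from _ (by norm_num : (0:Int) ≤ 6), ← hr, h6', List.drop_left]
    have hlen : r.length = 1 := by
      rw [PySem.Str.len_eq, hds] at h1
      omega
    obtain ⟨ch, hch⟩ := List.length_eq_one_iff.mp hlen
    have hmem : ch ∈ ['1','2','3','4','5','6'] := by
      have hinf := (PySem.Str.isIn_iff_infix (pvDs s) "123456").mp h2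
      rw [hds, hch] at hinf
      have := (singleton_infix_iff_mem ch ("123456".toList)).mp hinf
      simpa [show "123456".toList = ['1','2','3','4','5','6'] from by decide] using this
    have hs : s.toList = "diff_x".toList ++ [ch] := by rw [← hr, hch]
    fin_cases hmem
    · have he : s = "diff_x1" := String.ext (by rw [hs]; decide)
      simp [he]
    · have he : s = "diff_x2" := String.ext (by rw [hs]; decide)
      simp [he]
    · have he : s = "diff_x3" := String.ext (by rw [hs]; decide)
      simp [he]
    · have he : s = "diff_x4" := String.ext (by rw [hs]; decide)
      simp [he]
    · have he : s = "diff_x5" := String.ext (by rw [hs]; decide)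
      simp [he]
    · have he : s = "diff_x6" := String.ext (by rw [hs]; decide)
      simp [he]
  · exfalso
    unfold pvDs at h1
    rw [if_neg hsw, PySem.Str.len_eq] at h1
    exact absurd h1 (by decide)

theorem pvFs_valid (s : String)
    (h1 : PySem.Str.len (pvFs s) = 1)
    (h2 : PySem.Str.isIn (pvFs s) "123456" = true) :
    s ∈ (["x1","x2","x3","x4","x5","x6"] : List String) := by
  by_cases hsw : PySem.Str.startswith s "x" = true
  · have hsw' : PySem.Chars.startswith s.toList "x".toList = true := by
      rw [← PySem.Str.startswith_eq]; exact hsw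
    obtain ⟨r, hr⟩ := (PySem.Chars.startswith_iff s.toList "x".toList).mp hsw'
    have h1' : ((1:Int).toNat) = "x".toList.length := by decide
    have hds : (pvFs s).toList = r := by
      unfold pvFs
      rw [if_pos hsw]
      rw [PySem.Str.toList_slice, PySem.Chars.slice_eq_listSlice,
        PySem.List.slice_from _ (by norm_num : (0:Int) ≤ 1), ← hr, h1', List.drop_left]
    have hlen : r.length = 1 := by
      rw [PySem.Str.len_eq, hds] at h1
      omega
    obtain ⟨ch, hch⟩ := List.length_eq_one_iff.mp hlen
    have hmem : ch ∈ ['1','2','3','4','5','6'] := by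
      have hinf := (PySem.Str.isIn_iff_infix (pvFs s) "123456").mp h2
      rw [hds, hch] at hinf
      have := (singleton_infix_iff_mem ch ("123456".toList)).mp hinf
      simpa [show "123456".toList = ['1','2','3','4','5','6'] from by decide] using this
    have hs : s.toList = "x".toList ++ [ch] := by rw [← hr, hch]
    fin_cases hmem
    · have he : s = "x1" := String.ext (by rw [hs]; decide)
      simp [he]
    · have he : s = "x2" := String.ext (by rw [hs]; decide)
      simp [he]
    · have he : s = "x3" := String.ext (by rw [hs]; decide)
      simp [he]
    · have he : s = "x4" := String.ext (by rw [hs]; decide)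
      simp [he]
    · have he : s = "x5" := String.ext (by rw [hs]; decide)
      simp [he]
    · have he : s = "x6" := String.ext (by rw [hs]; decide)
      simp [he]
  · exfalso
    unfold pvFs at h1
    rw [if_neg hsw, PySem.Str.len_eq] at h1
    exact absurd h1 (by decide)

-- ===== VERDICT (by name: the statement is the Claim_ definition above) =====
theorem determine_x_match_spec : Claim_equal_determine_x_match := by
  intro custom_name diff_name filt_name _
  show determine_x_match custom_name diff_name filt_name
      = determine_x_match_alt custom_name diff_name filt_name
  by_cases hdf : diff_name ∈ (["diff_x1","diff_x2","diff_x3","diff_x4","diff_x5","diff_x6"] : List String)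
      ∧ filt_name ∈ (["x1","x2","x3","x4","x5","x6"] : List String)
  · obtain ⟨hd, hf⟩ := hdf
    fin_cases hd <;> fin_cases hf <;> (unfold determine_x_match determine_x_match_alt; decide)
  · have hA : determine_x_match custom_name diff_name filt_name = (false, none) := by
      unfold determine_x_match
      rw [if_neg]
      intro hc
      rw [Bool.and_eq_true] at hc
      exact hdf ⟨by
          have := hc.1
          rw [pvDiffs_eq] at this
          simpa using this,
        by
          have := hc.2
          rw [pvFilts_eq] at this
          simpa using this⟩
    have hB : determine_x_match_alt custom_name diff_name filt_name = (false, none) := by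
      unfold determine_x_match_alt
      rw [if_neg]
      intro hc
      simp only [Bool.and_eq_true, beq_iff_eq] at hc
      exact hdf ⟨pvDs_valid diff_name hc.1.1.1 hc.1.1.2, pvFs_valid filt_name hc.1.2 hc.2⟩
    rw [hA, hB]
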